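-- pv_equiv track=rewrite | github.com/mikiSpoko200/artificial-intelligence | sheet01/ex4/main.py | opt_dist
-- ===== SOURCE A (Python) =====
-- def opt_dist(binary_array: list[int] | bytearray, D: int) -> int:
--     num_of_switches = set()
--     possible_divisions = [
--         (binary_array[i:D + i], binary_array[:i] + binary_array[D + i:]) for i in range(0, len(binary_array) - D + 1)
--     ]
--
--     for window, rest in possible_divisions:
--         window_on_bits = sum(window)
--         window_off_bits = D - window_on_bits
--         rest_on_bits = sum(rest)
--         num_of_switches.add(window_off_bits + rest_on_bits)
--
--     return min(num_of_switches)
-- ===== SOURCE B (Python) =====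
-- def opt_dist(binary_array, D):
--     prefix = [0]
--     for x in binary_array:
--         prefix.append(prefix[-1] + x)
--     total = prefix[-1]
--     window_sums = [prefix[i + D] - prefix[i] for i in range(len(binary_array) - D + 1)]
--     return D + total - 2 * max(window_sums)
-- ===== Notes on version B (the rewrite author's own statement) =====
-- stated objective: faster
-- what changed: Replaced the O(n*D) enumeration that materialises every (window, rest) slice pair and sums each from scratch with a single prefix-sum array: each window sum is prefix[i+D]-prefix[i] and the answer is D + total - 2*max(window sums).
-- outside the precondition, e.g. on opt_dist([1, 0, 1], -1): A returns -1, B raises IndexError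
import Mathlib
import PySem

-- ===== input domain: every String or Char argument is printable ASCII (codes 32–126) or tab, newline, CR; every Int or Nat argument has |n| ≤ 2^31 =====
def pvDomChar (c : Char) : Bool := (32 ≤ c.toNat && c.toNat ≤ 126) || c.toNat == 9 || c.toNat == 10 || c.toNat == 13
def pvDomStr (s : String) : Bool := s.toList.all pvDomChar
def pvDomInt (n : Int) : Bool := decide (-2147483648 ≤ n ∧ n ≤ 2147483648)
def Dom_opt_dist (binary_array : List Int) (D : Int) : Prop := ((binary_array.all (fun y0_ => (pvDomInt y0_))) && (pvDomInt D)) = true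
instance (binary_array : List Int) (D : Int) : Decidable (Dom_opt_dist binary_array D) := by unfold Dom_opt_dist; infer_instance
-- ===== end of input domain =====

-- B replaces A's O(n*D) window/rest slice enumeration by one O(n) prefix-sum pass:
-- answer = D + total - 2 * max window sum (objective: faster, asymptotic).


-- ===== PORT A =====
def opt_dist (binary_array : List Int) (D : Int) : Int :=
  let possible_divisions :=
    (PySem.List.pyRange 0 ((binary_array.length : Int) - D + 1) 1).map
      (fun i => (PySem.List.slice binary_array (some i) (some (D + i)),
                 PySem.List.slice binary_array none (some i) ++
                   PySem.List.slice binary_array (some (D + i)) none))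
  let num_of_switches : PySem.Set Int :=
    possible_divisions.foldl
      (fun s wr => PySem.Set.add s ((D - wr.1.sum) + wr.2.sum)) PySem.Set.empty
  -- min() of an empty set raises ValueError: Pre_ (D ≤ len) excludes that, so .getD 0 is unreachable
  (PySem.List.min? num_of_switches (fun x => x)).getD 0

-- ===== PORT B =====
def opt_dist_alt (binary_array : List Int) (D : Int) : Int :=
  let prefix_ := binary_array.foldl (fun ps x => ps ++ [PySem.List.pyGetD ps (-1) 0 + x]) [0]
  let total := PySem.List.pyGetD prefix_ (-1) 0
  -- prefix[i + D] / prefix[i]: under Pre_ (0 ≤ D ≤ len) both indices are in range, so pyGetD is exact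
  let window_sums :=
    (PySem.List.pyRange 0 ((binary_array.length : Int) - D + 1) 1).map
      (fun i => PySem.List.pyGetD prefix_ (i + D) 0 - PySem.List.pyGetD prefix_ i 0)
  -- max() of an empty list raises ValueError: excluded by Pre_ (D ≤ len)
  D + total - 2 * (PySem.List.max? window_sums (fun x => x)).getD 0

-- ===== PRECONDITION & SPEC =====
-- Pre_ keeps the natural domain of a window size D: it excludes D > len(binary_array), where A's
-- min() of an empty set raises ValueError, and D < 0, outside the natural domain, where A's
-- negative slice endpoints wrap around and B raises IndexError.
def Pre_opt_dist (binary_array : List Int) (D : Int) : Prop :=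
  0 ≤ D ∧ D ≤ binary_array.length
instance (binary_array : List Int) (D : Int) : Decidable (Pre_opt_dist binary_array D) := by
  unfold Pre_opt_dist; infer_instance
def pvWitness_opt_dist : List Int × Int := ([1, 0, 1, 1, 0], 3)

def Spec_opt_dist (binary_array : List Int) (D : Int) (out : Int) : Prop := out = opt_dist_alt binary_array D
instance (binary_array : List Int) (D : Int) (out : Int) : Decidable (Spec_opt_dist binary_array D out) := by unfold Spec_opt_dist; infer_instance

-- ===== CLAIM (what is proved, stated in full; the proofs are below) =====
def Claim_equal_opt_dist : Prop := ∀ (binary_array : List Int) (D : Int), Dom_opt_dist binary_array D → Pre_opt_dist binary_array D → Spec_opt_dist binary_array D (opt_dist binary_array D)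

-- ===== LEMMAS AND PROOFS =====

-- sums of take/drop pieces
lemma sum_drop_take (xs : List Int) (a b : Nat) :
    ((xs.drop a).take b).sum = (xs.take (a + b)).sum - (xs.take a).sum := by
  rw [List.take_add, List.sum_append]; ring

lemma sum_drop_eq (xs : List Int) (a : Nat) :
    (xs.drop a).sum = xs.sum - (xs.take a).sum := by
  conv_lhs => rw [show xs.drop a = xs.drop a from rfl]
  have h := List.take_append_drop a xs
  have : (xs.take a).sum + (xs.drop a).sum = xs.sum := by
    rw [← List.sum_append, h]
  omega

-- B's prefix list is the list of partial sums
lemma prefix_eq (arr : List Int) :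
    arr.foldl (fun ps x => ps ++ [PySem.List.pyGetD ps (-1) 0 + x]) [0]
      = (List.range (arr.length + 1)).map (fun k => ((arr.take k).sum : Int)) := by
  induction arr using List.reverseRecOn with
  | nil => simp
  | append_singleton ys x ih =>
      have hlen : (ys ++ [x]).length = ys.length + 1 := by simp
      rw [List.foldl_append, ih, List.foldl_cons, List.foldl_nil]
      rw [List.range_succ, List.map_append, List.map_singleton,
          PySem.List.pyGetD_neg_one_append_singleton]
      rw [hlen, List.range_succ (n := ys.length + 1), List.map_append, List.map_singleton,
          List.range_succ (n := ys.length), List.map_append, List.map_singleton]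
      congr 1
      · congr 1
        · exact List.map_congr_left (fun k hk => by
            rw [List.mem_range] at hk
            rw [List.take_append_of_le_length (le_of_lt hk)])
        · simp [List.take_append_of_le_length (le_refl ys.length)]
      · simp [List.take_of_length_le (show (ys ++ [x]).length ≤ ys.length + 1 by simp)]

-- indexing into the prefix list
lemma getD_prefix (arr : List Int) (j : Int) (h0 : 0 ≤ j) (h1 : j ≤ arr.length) :
    PySem.List.pyGetD ((List.range (arr.length + 1)).map (fun k => ((arr.take k).sum : Int))) j 0
      = (arr.take j.toNat).sum := by
  rw [PySem.List.pyGetD_eq_getElem _ 0 h0 (by simp; omega)]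
  simp

-- min? with key id is determined by membership and minimality
lemma min?_eq_of_mem_min (l : List Int) (v : Int) (hv : v ∈ l) (hmin : ∀ y ∈ l, v ≤ y) :
    PySem.List.min? l (fun x => x) = some v := by
  cases h : PySem.List.min? l (fun x => x) with
  | none =>
      rw [PySem.List.min?_eq_none_iff] at h
      subst h; simp at hv
  | some m =>
      have hm := PySem.List.min?_mem h
      have h1 := PySem.List.min?_isMin h v hv
      have h2 := hmin m hm
      simp only [Option.some.injEq]
      omega

-- ===== VERDICT (by name: the statement is the Claim_ definition above) =====


theorem opt_dist_spec : Claim_equal_opt_dist := by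
  intro arr D _ hpre
  obtain ⟨hD0, hDn⟩ := hpre
  unfold Spec_opt_dist opt_dist opt_dist_alt
  simp only []
  set n := arr.length with hn
  set T : Int → Int := fun j => ((arr.take j.toNat).sum : Int) with hT
  -- rewrite B's prefix accesses
  rw [prefix_eq]
  have htotal : PySem.List.pyGetD ((List.range (n + 1)).map (fun k => ((arr.take k).sum : Int))) (-1) 0
      = arr.sum := by
    rw [List.range_succ, List.map_append, List.map_singleton,
        PySem.List.pyGetD_neg_one_append_singleton]
    show (List.take n arr).sum = arr.sum
    rw [hn, List.take_length]
  rw [htotal]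
  -- both mapped lists, rewritten to closed forms over T
  have hws : ((PySem.List.pyRange 0 ((n : Int) - D + 1) 1).map
        (fun i => PySem.List.pyGetD ((List.range (n + 1)).map (fun k => ((arr.take k).sum : Int))) (i + D) 0
          - PySem.List.pyGetD ((List.range (n + 1)).map (fun k => ((arr.take k).sum : Int))) i 0))
      = (PySem.List.pyRange 0 ((n : Int) - D + 1) 1).map (fun i => T (i + D) - T i) := by
    apply List.map_congr_left
    intro i hi
    rw [PySem.List.mem_pyRange_one] at hi
    rw [getD_prefix arr (i + D) (by omega) (by omega), getD_prefix arr i (by omega) (by omega)]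
  rw [hws]
  -- A's set of switch counts = set of (D + arr.sum - 2 * w i)
  have hAcosts : ∀ i ∈ PySem.List.pyRange 0 ((n : Int) - D + 1) 1,
      (D - (PySem.List.slice arr (some i) (some (D + i))).sum)
        + (PySem.List.slice arr none (some i) ++ PySem.List.slice arr (some (D + i)) none).sum
      = D + arr.sum - 2 * (T (i + D) - T i) := by
    intro i hi
    rw [PySem.List.mem_pyRange_one] at hi
    rw [PySem.List.slice_toNat arr (by omega) (by omega)]
    rw [PySem.List.slice_to arr (by omega), PySem.List.slice_from arr (by omega)]
    rw [List.sum_append, sum_drop_take, sum_drop_eq]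
    have h1 : (D + i).toNat = i.toNat + (D + i - i).toNat := by omega
    have h2 : i.toNat + ((D + i).toNat - i.toNat) = (D + i).toNat := by omega
    rw [h2]
    have h3 : (i + D).toNat = (D + i).toNat := by omega
    simp only [hT, h3]
    ring
  -- fold building the set = ofList of the mapped costs
  have hfold : ∀ (pd : List (List Int × List Int)) (g : List Int × List Int → Int),
      pd.foldl (fun s wr => PySem.Set.add s (g wr)) PySem.Set.empty
        = PySem.Set.ofList (pd.map g) := by
    intro pd g
    rw [PySem.Set.ofList_eq_foldl, List.foldl_map]
    rfl
  rw [hfold]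
  -- nonemptiness of the index range
  have hne : PySem.List.pyRange 0 ((n : Int) - D + 1) 1 ≠ [] := by
    intro h
    have : (0 : Int) ∈ PySem.List.pyRange 0 ((n : Int) - D + 1) 1 := by
      rw [PySem.List.mem_pyRange_one]; omega
    rw [h] at this; simp at this
  cases hmax : PySem.List.max? ((PySem.List.pyRange 0 ((n : Int) - D + 1) 1).map (fun i => T (i + D) - T i)) (fun x => x) with
  | none =>
      rw [PySem.List.max?_eq_none_iff] at hmax
      exact absurd (List.map_eq_nil_iff.mp hmax) hne
  | some m =>
      have hmmem := PySem.List.max?_mem hmax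
      have hmmax := PySem.List.max?_isMax hmax
      -- A's min over the set is some (D + arr.sum - 2 * m)
      have hmin : PySem.List.min? (PySem.Set.ofList
          (((PySem.List.pyRange 0 ((n : Int) - D + 1) 1).map
              (fun i => (PySem.List.slice arr (some i) (some (D + i)),
                         PySem.List.slice arr none (some i) ++ PySem.List.slice arr (some (D + i)) none))).map
            (fun wr => (D - wr.1.sum) + wr.2.sum)))
          (fun x => x) = some (D + arr.sum - 2 * m) := by
        apply min?_eq_of_mem_min
        · rw [PySem.Set.mem_ofList]
          rw [List.mem_map] at hmmem
          obtain ⟨i, hi, hiw⟩ := hmmem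
          refine List.mem_map.mpr ⟨_, List.mem_map_of_mem hi, ?_⟩
          rw [← hiw]
          exact hAcosts i hi
        · intro y hy
          rw [PySem.Set.mem_ofList, List.mem_map] at hy
          obtain ⟨wr, hwr, hy'⟩ := hy
          rw [List.mem_map] at hwr
          obtain ⟨i, hi, hwi⟩ := hwr
          subst hwi
          rw [← hy']
          have h2 := hmmax _ (List.mem_map_of_mem (f := fun i => T (i + D) - T i) hi)
          simp only [] at h2
          have h3 := hAcosts i hi
          calc D + arr.sum - 2 * m ≤ D + arr.sum - 2 * (T (i + D) - T i) := by omega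
            _ = _ := h3.symm
      rw [hmin]
      simp
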